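-- pv_equiv track=rewrite | github.com/Anjalijha12345/DSA--Problem | Question 3/boundedMatrixTraversal.py | boundary_traversal
-- ===== SOURCE A (Python) =====
-- def boundary_traversal(matrix, n, m):
--     result = []
--
--     if n == 1:
--         return matrix[0]
--     if m == 1:
--         return [matrix[i][0] for i in range(n)]
--
--     for i in range(m):
--         result.append(matrix[0][i])
--
--     for i in range(1, n):
--         result.append(matrix[i][m - 1])
--
--     if n > 1:
--         for i in range(m - 2, -1, -1):
--             result.append(matrix[n - 1][i])
--
--     if m > 1:
--         for i in range(n - 2, 0, -1):
--             result.append(matrix[i][0])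
--
--     return result
-- ===== SOURCE B (Python) =====
-- def boundary_traversal(matrix, n, m):
--     if n == 1:
--         return matrix[0]
--     if m == 1:
--         return [matrix[i][0] for i in range(n)]
--     # single clockwise boundary walk: position + direction as state
--     result = []
--     r, c, dr, dc = 0, 0, 0, 1
--     remaining = 2 * m + 2 * n - 4
--     while remaining > 0:
--         result.append(matrix[r][c])
--         nr, nc = r + dr, c + dc
--         if not (0 <= nr < n and 0 <= nc < m):
--             dr, dc = dc, -dr  # turn clockwise
--             nr, nc = r + dr, c + dc
--         r, c = nr, nc
--         remaining -= 1
--     return result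
-- ===== Notes on version B (the rewrite author's own statement) =====
-- stated objective: alternative
-- what changed: Replaces the four separate edge loops by a single clockwise walk that maintains position and direction as state and turns at the matrix corners.
-- outside the precondition, e.g. on boundary_traversal([[1, 2], [3, 4]], 0, 2): A returns [1, 2], B returns []
import Mathlib
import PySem

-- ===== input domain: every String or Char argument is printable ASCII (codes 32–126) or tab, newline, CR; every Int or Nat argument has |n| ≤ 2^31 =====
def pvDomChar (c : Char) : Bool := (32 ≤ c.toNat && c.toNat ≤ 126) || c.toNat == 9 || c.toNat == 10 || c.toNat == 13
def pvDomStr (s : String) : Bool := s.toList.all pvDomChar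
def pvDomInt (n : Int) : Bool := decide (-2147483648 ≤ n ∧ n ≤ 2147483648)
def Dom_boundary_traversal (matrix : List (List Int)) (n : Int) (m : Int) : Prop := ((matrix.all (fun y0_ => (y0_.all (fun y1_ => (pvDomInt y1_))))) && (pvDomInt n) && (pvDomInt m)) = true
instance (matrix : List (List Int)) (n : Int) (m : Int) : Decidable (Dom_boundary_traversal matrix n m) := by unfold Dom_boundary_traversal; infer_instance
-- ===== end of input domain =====

-- B replaces A's four separate edge loops by one clockwise boundary walk keeping position and direction as state; same return value on shape-consistent inputs.

-- shared indexing helper: matrix[r][c]  (always in range under Pre_)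
def elemAt (matrix : List (List Int)) (r c : Int) : Int :=
  PySem.List.pyGetD (PySem.List.pyGetD matrix r []) c 0

-- ===== PORT A =====
def boundary_traversal (matrix : List (List Int)) (n : Int) (m : Int) : List Int :=
  if n = 1 then PySem.List.pyGetD matrix 0 []
  else if m = 1 then (PySem.List.pyRange 0 n 1).map (fun i => elemAt matrix i 0)
  else
    let r1 := (PySem.List.pyRange 0 m 1).foldl (fun acc i => acc ++ [elemAt matrix 0 i]) []
    let r2 := (PySem.List.pyRange 1 n 1).foldl (fun acc i => acc ++ [elemAt matrix i (m - 1)]) r1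
    let r3 := if 1 < n then (PySem.List.pyRange (m - 2) (-1) (-1)).foldl (fun acc i => acc ++ [elemAt matrix (n - 1) i]) r2 else r2
    let r4 := if 1 < m then (PySem.List.pyRange (n - 2) 0 (-1)).foldl (fun acc i => acc ++ [elemAt matrix i 0]) r3 else r3
    r4

-- ===== PORT B =====
-- the while loop of Source B: fuel = remaining boundary cells, state = position (r, c) and direction (dr, dc); turn clockwise when the next step leaves the matrix
def bwalk (matrix : List (List Int)) (n m : Int) : Nat → Int → Int → Int → Int → List Int
  | 0, _, _, _, _ => []
  | Nat.succ k, r, c, dr, dc =>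
      let nr := r + dr
      let nc := c + dc
      if 0 ≤ nr ∧ nr < n ∧ 0 ≤ nc ∧ nc < m then
        elemAt matrix r c :: bwalk matrix n m k nr nc dr dc
      else
        elemAt matrix r c :: bwalk matrix n m k (r + dc) (c - dr) dc (-dr)

def boundary_traversal_alt (matrix : List (List Int)) (n : Int) (m : Int) : List Int :=
  if n = 1 then PySem.List.pyGetD matrix 0 []
  else if m = 1 then (PySem.List.pyRange 0 n 1).map (fun i => elemAt matrix i 0)
  else bwalk matrix n m (2 * m + 2 * n - 4).toNat 0 0 0 1

-- ===== PRECONDITION & SPEC =====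
-- Pre_ excludes inputs where exactly one of n, m overshoots or undershoots the matrix's real
-- extent: there A's value (when it returns at all) is an accident of partially run loops and
-- negative-index wraparound (e.g. matrix[i][m-1] with m <= 0).
def Pre_boundary_traversal (matrix : List (List Int)) (n : Int) (m : Int) : Prop :=
  (n = 1 ∧ matrix ≠ [])
  ∨ (n ≠ 1 ∧ m = 1 ∧ n ≤ (matrix.length : Int) ∧ ∀ row ∈ matrix.take n.toNat, row ≠ [])
  ∨ (n ≤ 0 ∧ m ≤ 0)
  ∨ (2 ≤ n ∧ 2 ≤ m ∧ n ≤ (matrix.length : Int) ∧ ∀ row ∈ matrix.take n.toNat, m ≤ (row.length : Int))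
instance (matrix : List (List Int)) (n : Int) (m : Int) : Decidable (Pre_boundary_traversal matrix n m) := by unfold Pre_boundary_traversal; infer_instance

def pvWitness_boundary_traversal : List (List Int) × Int × Int := ([[1, 2, 3], [4, 5, 6], [7, 8, 9]], 3, 3)

def Spec_boundary_traversal (matrix : List (List Int)) (n : Int) (m : Int) (out : List Int) : Prop := out = boundary_traversal_alt matrix n m
instance (matrix : List (List Int)) (n : Int) (m : Int) (out : List Int) : Decidable (Spec_boundary_traversal matrix n m out) := by unfold Spec_boundary_traversal; infer_instance

-- ===== CLAIM (what is proved, stated in full; the proofs are below) =====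
def Claim_equal_boundary_traversal : Prop := ∀ (matrix : List (List Int)) (n : Int) (m : Int), Dom_boundary_traversal matrix n m → Pre_boundary_traversal matrix n m → Spec_boundary_traversal matrix n m (boundary_traversal matrix n m)

-- ===== LEMMAS AND PROOFS =====

-- right leg: along row 0 from column c to m-1, then turn down into (1, m-1)
lemma leg_right (matrix : List (List Int)) (n m : Int) (hn : 2 ≤ n) (rest k : Nat) :
    ∀ (c : Int), 0 ≤ c → c + k = m - 1 →
      bwalk matrix n m (k + 1 + rest) 0 c 0 1 =
        (List.range (k + 1)).map (fun (j : Nat) => elemAt matrix 0 (c + (j : Int))) ++ bwalk matrix n m rest 1 (m - 1) 1 0 := by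
  induction k with
  | zero =>
      intro c hc hk
      simp only [Nat.cast_zero, add_zero] at hk
      subst hk
      rw [show 0 + 1 + rest = Nat.succ rest from by omega]
      simp only [bwalk]
      rw [if_neg (by omega)]
      norm_num
  | succ k ih =>
      intro c hc hk
      push_cast at hk
      rw [show k + 1 + 1 + rest = Nat.succ (k + 1 + rest) from by omega]
      simp only [bwalk]
      rw [if_pos (by omega)]
      simp only [add_zero]
      conv_rhs => rw [List.range_succ_eq_map, List.map_cons, List.cons_append, List.map_map]
      rw [ih (c + 1) (by omega) (by omega)]
      congr 1
      · norm_num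
      congr 1
      apply congrArg (List.map · (List.range (k + 1)))
      funext j
      simp only [Function.comp]
      congr 1
      push_cast
      ring

-- down leg: along column m-1 from row r to n-1, then turn left into (n-1, m-2)
lemma leg_down (matrix : List (List Int)) (n m : Int) (hm : 2 ≤ m) (rest k : Nat) :
    ∀ (r : Int), 1 ≤ r → r + k = n - 1 →
      bwalk matrix n m (k + 1 + rest) r (m - 1) 1 0 =
        (List.range (k + 1)).map (fun (j : Nat) => elemAt matrix (r + (j : Int)) (m - 1)) ++ bwalk matrix n m rest (n - 1) (m - 2) 0 (-1) := by
  induction k with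
  | zero =>
      intro r hr hk
      simp only [Nat.cast_zero, add_zero] at hk
      subst hk
      rw [show 0 + 1 + rest = Nat.succ rest from by omega]
      simp only [bwalk]
      rw [if_neg (by omega)]
      rw [show m - 1 - 1 = m - 2 from by ring]
      norm_num
  | succ k ih =>
      intro r hr hk
      push_cast at hk
      rw [show k + 1 + 1 + rest = Nat.succ (k + 1 + rest) from by omega]
      simp only [bwalk]
      rw [if_pos (by omega)]
      simp only [add_zero]
      conv_rhs => rw [List.range_succ_eq_map, List.map_cons, List.cons_append, List.map_map]
      rw [ih (r + 1) (by omega) (by omega)]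
      congr 1
      · norm_num
      congr 1
      apply congrArg (List.map · (List.range (k + 1)))
      funext j
      simp only [Function.comp]
      congr 1
      push_cast
      ring

-- left leg: along row n-1 from column c down to 0, then turn up into (n-2, 0)
lemma leg_left (matrix : List (List Int)) (n m : Int) (hn : 2 ≤ n) (rest k : Nat) :
    ∀ (c : Int), c = (k : Int) → c ≤ m - 2 →
      bwalk matrix n m (k + 1 + rest) (n - 1) c 0 (-1) =
        (List.range (k + 1)).map (fun (j : Nat) => elemAt matrix (n - 1) (c - (j : Int))) ++ bwalk matrix n m rest (n - 2) 0 (-1) 0 := by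
  induction k with
  | zero =>
      intro c hc _
      simp only [Nat.cast_zero] at hc
      subst hc
      rw [show 0 + 1 + rest = Nat.succ rest from by omega]
      simp only [bwalk]
      rw [if_neg (by omega)]
      rw [show n - 1 + (-1) = n - 2 from by ring]
      norm_num
  | succ k ih =>
      intro c hc hcm
      push_cast at hc
      rw [show k + 1 + 1 + rest = Nat.succ (k + 1 + rest) from by omega]
      simp only [bwalk]
      rw [if_pos (by omega)]
      simp only [add_zero]
      rw [show c + (-1) = c - 1 from by ring]
      conv_rhs => rw [List.range_succ_eq_map, List.map_cons, List.cons_append, List.map_map]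
      rw [ih (c - 1) (by omega) (by omega)]
      congr 1
      · norm_num
      congr 1
      apply congrArg (List.map · (List.range (k + 1)))
      funext j
      simp only [Function.comp]
      congr 1
      push_cast
      ring

-- up leg: along column 0 from row r down to 1; the fuel runs out exactly there
lemma leg_up (matrix : List (List Int)) (n m : Int) (hm : 2 ≤ m) (k : Nat) :
    ∀ (r : Int), r = (k : Int) → r ≤ n - 2 →
      bwalk matrix n m k r 0 (-1) 0 =
        (List.range k).map (fun (j : Nat) => elemAt matrix (r - (j : Int)) 0) := by
  induction k with
  | zero => intro r hr _; simp [bwalk]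
  | succ k ih =>
      intro r hr hk
      push_cast at hr
      simp only [bwalk]
      rw [if_pos (by omega)]
      simp only [add_zero]
      rw [show r + (-1) = r - 1 from by ring]
      conv_rhs => rw [List.range_succ_eq_map, List.map_cons, List.map_map]
      rw [ih (r - 1) (by omega) (by omega)]
      congr 1
      · norm_num
      apply congrArg (List.map · (List.range k))
      funext j
      simp only [Function.comp]
      congr 1
      push_cast
      ring

-- ===== VERDICT (by name: the statement is the Claim_ definition above) =====
theorem boundary_traversal_spec : Claim_equal_boundary_traversal := by
  intro matrix n m _hdom hpre
  unfold Spec_boundary_traversal boundary_traversal boundary_traversal_alt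
  by_cases hn : n = 1
  · simp [hn]
  by_cases hm : m = 1
  · simp [hn, hm]
  rw [if_neg hn, if_neg hm, if_neg hn, if_neg hm]
  rcases hpre with ⟨h1, _⟩ | ⟨_, h1, _⟩ | ⟨hn0, hm0⟩ | ⟨hn2, hm2, _, _⟩
  · exact absurd h1 hn
  · exact absurd h1 hm
  · -- degenerate n ≤ 0 ∧ m ≤ 0: every loop of A is empty and the walk has no fuel
    rw [PySem.List.pyRange_one_eq_nil (by omega), PySem.List.pyRange_one_eq_nil (by omega)]
    rw [show (2 * m + 2 * n - 4).toNat = 0 from by omega]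
    simp only [bwalk, List.foldl_nil]
    rw [if_neg (by omega : ¬(1:Int) < n), if_neg (by omega : ¬(1:Int) < m)]
  · simp only [PySem.List.foldl_append_singleton_eq_map, if_pos (by omega : (1:Int) < n),
      if_pos (by omega : (1:Int) < m), List.nil_append]
    have hfuel : (2 * m + 2 * n - 4).toNat =
        (m - 1).toNat + 1 + ((n - 2).toNat + 1 + ((m - 2).toNat + 1 + (n - 2).toNat)) := by omega
    rw [hfuel]
    rw [leg_right matrix n m hn2 _ (m - 1).toNat 0 le_rfl (by omega)]
    rw [leg_down matrix n m hm2 _ (n - 2).toNat 1 le_rfl (by omega)]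
    rw [leg_left matrix n m hn2 _ (m - 2).toNat (m - 2) (by omega) (by omega)]
    rw [leg_up matrix n m hm2 (n - 2).toNat (n - 2) (by omega) le_rfl]
    rw [PySem.List.pyRange_one, PySem.List.pyRange_one, PySem.List.pyRange_neg_one,
      PySem.List.pyRange_neg_one]
    simp only [List.map_map, List.append_assoc]
    rw [show (m - 0).toNat = (m - 1).toNat + 1 from by omega,
      show (n - 1).toNat = (n - 2).toNat + 1 from by omega,
      show (m - 2 - (-1)).toNat = (m - 2).toNat + 1 from by omega,
      show (n - 2 - 0).toNat = (n - 2).toNat from by omega]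
    rfl
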